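-- pv_equiv track=rewrite | github.com/AbhiSaphire/Competitive-Programming-Solutions | Coding Club India/Asked Google Interview Questions/MaxSumDigits.py | MaxSumDigits
-- ===== SOURCE A (Python) =====
-- import collections
--
-- def MaxSumDigits(n):
-- 	summ = []
-- 	for i in range(1, n+1):
-- 		temp = 0
-- 		while int(i):
-- 			temp  += i%10
-- 			i = i//10
-- 		summ.append(temp)
--
-- 	curr = count = 0
-- 	for i in collections.Counter(summ).values():
--
-- 		if i >= curr:
-- 			count += 1
-- 			curr = i
--
-- 	return count
-- ===== SOURCE B (Python) =====
-- def MaxSumDigits(n):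
--     # Recursion over decimal prefixes instead of scanning 1..n: V(m)[s] = how
--     # many x in [0..m] have digit sum s.  First-appearance order of digit sums in
--     # 1..n is ascending, so scanning s = 1, 2, ... replicates the
--     # Counter-insertion-order loop of the original.
--     def at(xs, i):
--         return xs[i] if 0 <= i < len(xs) else 0
--
--     def V(m):
--         if m < 0:
--             return []
--         if m == 0:
--             return [1]
--         q, r = divmod(m, 10)
--         lo, hi = V(q - 1), V(q)
--         return [sum(at(hi if d <= r else lo, s - d) for d in range(10))
--                 for s in range(len(hi) + 9)]
--
--     if n < 1:
--         return 0
--     f = V(n)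
--     curr = count = 0
--     for s in range(1, len(f)):
--         v = f[s]
--         if v == 0:
--             continue
--         if v >= curr:
--             count += 1
--             curr = v
--     return count
-- ===== Notes on version B (the rewrite author's own statement) =====
-- stated objective: faster
-- what changed: Instead of scanning every i in 1..n and Counter-ing digit sums, B counts how many x in [0..m] have each digit sum via a recursion over decimal prefixes of n (two subproblems per decimal digit), and scans digit sums in ascending order, which provably equals their first-appearance order in 1..n.
import Mathlib
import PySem

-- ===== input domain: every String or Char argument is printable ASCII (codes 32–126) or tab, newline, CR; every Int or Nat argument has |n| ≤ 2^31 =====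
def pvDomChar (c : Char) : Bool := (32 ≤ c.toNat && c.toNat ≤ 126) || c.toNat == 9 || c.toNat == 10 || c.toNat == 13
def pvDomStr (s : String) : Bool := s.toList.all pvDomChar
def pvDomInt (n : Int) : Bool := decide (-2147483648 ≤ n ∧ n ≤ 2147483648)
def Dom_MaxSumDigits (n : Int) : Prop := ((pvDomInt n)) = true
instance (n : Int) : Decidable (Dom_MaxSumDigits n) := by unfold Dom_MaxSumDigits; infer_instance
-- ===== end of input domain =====

-- B replaces A's scan of 1..n by a recursion over decimal prefixes of n, scanning digit
-- sums in ascending order, which equals their first-appearance order in 1..n.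

-- ===== PORT A =====
-- the 'while int(i): temp += i%10; i = i//10' loop; the fuel i.natAbs only makes the
-- recursion total (the loop runs at most that many iterations for the i ≥ 1 it sees)
def aSumLoop : Nat → Int → Int → Int
  | 0, _, temp => temp
  | fuel + 1, i, temp =>
    if i ≠ 0 then aSumLoop fuel (PySem.Int.floordiv i 10) (temp + PySem.Int.mod i 10) else temp

def MaxSumDigits (n : Int) : Int :=
  let summ := (PySem.List.pyRange 1 (n + 1) 1).foldl
    (fun acc i => acc ++ [aSumLoop i.natAbs i 0]) []
  let p := (PySem.Dict.counter summ).values.foldl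
    (fun (p : Int × Int) i => if i ≥ p.1 then (i, p.2 + 1) else p) (0, 0)
  p.2

-- ===== PORT B =====
-- 'xs[i] if 0 <= i < len(xs) else 0'
def bAt (xs : List Int) (i : Int) : Int :=
  if 0 ≤ i ∧ i < PySem.List.len xs then PySem.List.pyGetD xs i 0 else 0

-- V(m): V(m)[s] = how many x in [0..m] have digit sum s
def bV (m : Int) : List Int :=
  if _h0 : m < 0 then []
  else if _h1 : m = 0 then [1]
  else
    let q := PySem.Int.floordiv m 10
    let r := PySem.Int.mod m 10
    let lo := bV (q - 1)
    let hi := bV q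
    (PySem.List.pyRange 0 ((PySem.List.len hi) + 9) 1).map (fun s =>
      ((PySem.List.pyRange 0 10 1).map (fun d => bAt (if d ≤ r then hi else lo) (s - d))).sum)
termination_by m.toNat
decreasing_by
  · have : PySem.Int.floordiv m 10 = m / 10 := PySem.Int.floordiv_eq_ediv_of_pos (by norm_num)
    rw [this]; omega
  · have : PySem.Int.floordiv m 10 = m / 10 := PySem.Int.floordiv_eq_ediv_of_pos (by norm_num)
    rw [this]; omega

def MaxSumDigits_alt (n : Int) : Int :=
  if n < 1 then 0
  else
    let f := bV n
    let p := (PySem.List.pyRange 1 (PySem.List.len f) 1).foldl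
      (fun (p : Int × Int) s =>
        let v := PySem.List.pyGetD f s 0
        if v = 0 then p else if v ≥ p.1 then (v, p.2 + 1) else p) (0, 0)
    p.2

-- ===== PRECONDITION & SPEC =====
def Spec_MaxSumDigits (n : Int) (out : Int) : Prop := out = MaxSumDigits_alt n
instance (n : Int) (out : Int) : Decidable (Spec_MaxSumDigits n out) := by unfold Spec_MaxSumDigits; infer_instance

-- ===== CLAIM (what is proved, stated in full; the proofs are below) =====
def Claim_equal_MaxSumDigits : Prop := ∀ (n : Int), Dom_MaxSumDigits n → Spec_MaxSumDigits n (MaxSumDigits n)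

-- ===== LEMMAS AND PROOFS =====

-- mathematical digit sum
def ds (x : Nat) : Nat := (Nat.digits 10 x).sum

-- number of x in [0..m] with digit sum s
def cnt (m : Nat) (s : Int) : Nat := (List.range (m + 1)).countP (fun x => (ds x : Int) == s)

-- cnt extended to Int upper bounds (negative bound = empty range)
def gN (m : Int) (s : Int) : Int := if m < 0 then 0 else (cnt m.toNat s : Int)

-- the digit sums of 1..N in order, and the ascending list 1..S
def summList (N : Nat) : List Int := (List.range N).map (fun k => (ds (k + 1) : Int))
def ascList (S : Nat) : List Int := (List.range S).map (fun j : Nat => (j : Int) + 1)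

lemma ds_rec (x : Nat) (hx : 0 < x) : ds x = x % 10 + ds (x / 10) := by
  unfold ds; rw [Nat.digits_def' (by norm_num) hx]; simp

lemma ds_zero : ds 0 = 0 := by simp [ds]

lemma ds_one : ds 1 = 1 := by rw [ds_rec 1 (by norm_num)]; simp [ds]

lemma ds_pos (x : Nat) (hx : 1 ≤ x) : 1 ≤ ds x := by
  induction x using Nat.strong_induction_on with
  | _ x ih =>
    rw [ds_rec x hx]
    rcases Nat.eq_zero_or_pos (x % 10) with h | h
    · have h10 : 1 ≤ x / 10 := by omega
      have := ih (x / 10) (by omega) h10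
      omega
    · omega

lemma ds_le (x : Nat) : ds x ≤ 9 * (Nat.digits 10 x).length := by
  induction x using Nat.strong_induction_on with
  | _ x ih =>
    rcases Nat.eq_zero_or_pos x with rfl | hx
    · simp [ds]
    · rw [ds_rec x hx, Nat.digits_def' (by norm_num) hx]
      simp only [List.length_cons]
      have := ih (x / 10) (by omega)
      omega

lemma ds_len_mono (x y : Nat) (h : x ≤ y) :
    (Nat.digits 10 x).length ≤ (Nat.digits 10 y).length :=
  (monotone_nat_of_le_succ (fun n => Nat.length_digits_le_length_digits_succ 10 n)) h

lemma ds_small (x : Nat) (h : x ≤ 1) : ds x ≤ 1 := by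
  interval_cases x
  · simp [ds_zero]
  · simp [ds_one]

-- aSumLoop computes the digit sum
lemma aSumLoop_eq (fuel x : Nat) (t : Int) (h : x ≤ fuel) :
    aSumLoop fuel (x : Int) t = t + (ds x : Int) := by
  induction fuel generalizing x t with
  | zero => interval_cases x; simp [aSumLoop, ds]
  | succ fuel ih =>
    rcases Nat.eq_zero_or_pos x with rfl | hx
    · simp [aSumLoop, ds]
    · rw [aSumLoop]
      have hne : (x : Int) ≠ 0 := by exact_mod_cast Nat.pos_iff_ne_zero.mp hx
      have hfd : PySem.Int.floordiv (x : Int) 10 = ((x / 10 : Nat) : Int) := by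
        exact_mod_cast PySem.Int.floordiv_natCast x 10
      have hmd : PySem.Int.mod (x : Int) 10 = ((x % 10 : Nat) : Int) := by
        exact_mod_cast PySem.Int.mod_natCast x 10
      rw [if_pos hne, hfd, hmd, ih (x / 10) _ (by omega), ds_rec x hx]
      push_cast; ring

lemma cnt_succ (m : Nat) (s : Int) :
    cnt (m + 1) s = cnt m s + (if (ds (m + 1) : Int) = s then 1 else 0) := by
  simp [cnt, List.range_succ, List.countP_append, List.countP_cons]
  split_ifs <;> omega

lemma cnt_zero (s : Int) : cnt 0 s = if s = 0 then 1 else 0 := by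
  simp [cnt, ds, List.countP_cons]
  split_ifs with h <;> simp_all [eq_comm]

-- the digit decomposition of cnt, matching bV's recursion
lemma cnt_decomp (m : Nat) (s : Int) :
    (cnt m s : Int) =
      ∑ d ∈ Finset.range 10,
        gN (if (d : Int) ≤ (m : Int) % 10 then (m : Int) / 10 else (m : Int) / 10 - 1)
          (s - d) := by
  induction m generalizing s with
  | zero =>
    rw [Finset.sum_eq_single_of_mem 0 (by simp)]
    · simp [gN, cnt_zero]
    · intro d _ hd
      have hd1 : 1 ≤ (d : Int) := by exact_mod_cast Nat.one_le_iff_ne_zero.mpr hd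
      rw [if_neg (by omega)]
      simp [gN]
  | succ m ih =>
    set e : Nat := (m + 1) % 10 with he
    set q : Nat := (m + 1) / 10 with hq
    have hlt : e < 10 := by omega
    have hmem : e ∈ Finset.range 10 := Finset.mem_range.mpr hlt
    have h1 : ((m : Int) + 1) % 10 = (e : Int) := by omega
    have h2 : ((m : Int) + 1) / 10 = (q : Int) := by omega
    have h3 : (1 ≤ e ∧ (m : Int) % 10 = (e : Int) - 1 ∧ (m : Int) / 10 = (q : Int)) ∨
        (e = 0 ∧ 1 ≤ q ∧ (m : Int) % 10 = 9 ∧ (m : Int) / 10 = (q : Int) - 1) := by omega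
    have key : ∀ d ∈ (Finset.range 10).erase e,
        gN (if (d : Int) ≤ ((m:Int)+1) % 10 then ((m:Int)+1) / 10 else ((m:Int)+1) / 10 - 1) (s - d)
        = gN (if (d : Int) ≤ (m : Int) % 10 then (m : Int) / 10 else (m : Int) / 10 - 1) (s - d) := by
      intro d hd
      have hdne : d ≠ e := (Finset.mem_erase.mp hd).1
      have hdne' : (d : Int) ≠ (e : Int) := by exact_mod_cast hdne
      have hd10 : d < 10 := Finset.mem_range.mp (Finset.mem_erase.mp hd).2
      have hd10' : (d : Int) < 10 := by exact_mod_cast hd10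
      congr 1
      rw [h1, h2]
      rcases h3 with ⟨h3a, h3b, h3c⟩ | ⟨h3a, h3x, h3b, h3c⟩ <;> rw [h3b, h3c] <;>
        split_ifs <;> omega
    have hFe : (if (e : Int) ≤ (m : Int) % 10 then (m : Int) / 10 else (m : Int) / 10 - 1)
        = (q : Int) - 1 := by
      rcases h3 with ⟨h3a, h3b, h3c⟩ | ⟨h3a, h3x, h3b, h3c⟩ <;> rw [h3b, h3c] <;>
        split_ifs <;> omega
    have hF'e : (if (e : Int) ≤ ((m:Int)+1) % 10 then ((m:Int)+1) / 10 else ((m:Int)+1) / 10 - 1)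
        = (q : Int) := by rw [h1, h2, if_pos le_rfl]
    have delta : gN ((q : Int)) (s - e) - gN ((q : Int) - 1) (s - e)
        = if (ds (m + 1) : Int) = s then 1 else 0 := by
      rcases Nat.eq_zero_or_pos q with hq0 | hqpos
      · have hds : ds (m + 1) = e := by
          rw [ds_rec (m+1) (by omega), ← he, ← hq, hq0]
          simp [ds]
        rw [hds, hq0]
        simp only [Nat.cast_zero, gN, if_neg (by omega : ¬ ((0:Int) < 0)),
          if_pos (by omega : (0:Int) - 1 < 0), Int.toNat_zero, cnt_zero]
        split_ifs <;> omega
      · have hq1 : q - 1 + 1 = q := by omega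
        have hds : ds (m + 1) = e + ds q := by rw [ds_rec (m+1) (by omega), ← he, ← hq]
        have hstep : cnt q (s - e) = cnt (q - 1) (s - e) + (if (ds q : Int) = s - e then 1 else 0) := by
          conv_lhs => rw [← hq1]
          rw [cnt_succ, hq1]
        simp only [gN, if_neg (by omega : ¬ ((q:Int) < 0)), if_neg (by omega : ¬ ((q:Int) - 1 < 0))]
        have hq1' : ((q : Int) - 1).toNat = q - 1 := by omega
        rw [hq1', Int.toNat_natCast, hstep, hds]
        push_cast
        split_ifs <;> push_cast at * <;> omega
    rw [cnt_succ]
    push_cast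
    have hsplit := (Finset.sum_erase_add (Finset.range 10)
      (fun d => gN (if (d : Int) ≤ ((m:Int)+1) % 10 then ((m:Int)+1) / 10 else ((m:Int)+1) / 10 - 1) (s - d)) hmem).symm
    rw [hsplit, Finset.sum_congr rfl key]
    have ih' : (cnt m s : Int) = (∑ d ∈ (Finset.range 10).erase e,
        gN (if (d : Int) ≤ (m : Int) % 10 then (m : Int) / 10 else (m : Int) / 10 - 1) (s - d))
        + gN (if (e : Int) ≤ (m : Int) % 10 then (m : Int) / 10 else (m : Int) / 10 - 1) (s - e) := by
      rw [ih s, ← Finset.sum_erase_add _ _ hmem]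
    rw [hFe] at ih'
    rw [hF'e]
    linarith [delta, ih']

lemma cnt_out (m : Nat) (s : Int) (h : s < 0 ∨ (9 * (Nat.digits 10 m).length : Int) < s) :
    cnt m s = 0 := by
  rw [cnt, List.countP_eq_zero]
  intro x hx
  simp only [beq_iff_eq]
  have hxm : x ≤ m := by simp at hx; omega
  have h1 := ds_le x
  have h2 := ds_len_mono x m hxm
  intro hc
  rcases h with h | h
  · omega
  · rw [← hc] at h; omega

lemma bV_length_aux (k : Nat) : ∀ m : Int, 0 ≤ m → m.toNat ≤ k →
    (bV m).length = 9 * (Nat.digits 10 m.toNat).length + 1 := by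
  induction k with
  | zero =>
    intro m h0 hk
    have : m = 0 := by omega
    subst this
    rw [bV]; simp
  | succ k ih =>
    intro m h0 hk
    rcases eq_or_lt_of_le h0 with h | hpos
    · rw [bV]; simp [← h]
    · rw [bV, dif_neg (by omega), dif_neg (by omega)]
      have hfd : PySem.Int.floordiv m 10 = m / 10 := PySem.Int.floordiv_eq_ediv_of_pos (by norm_num)
      have hq0 : 0 ≤ m / 10 := by omega
      have hqk : (m / 10).toNat ≤ k := by omega
      have hlen := ih (m / 10) hq0 hqk
      simp only [List.length_map, hfd]
      rw [PySem.List.length_pyRange_one]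
      have hL : (PySem.List.len (bV (m / 10))) = ((bV (m / 10)).length : Int) := by
        simp [PySem.List.len_eq]
      rw [hL, hlen]
      have hdig : (Nat.digits 10 m.toNat).length = (Nat.digits 10 (m.toNat / 10)).length + 1 := by
        rw [Nat.digits_def' (by norm_num) (by omega)]; simp
      have : (m / 10).toNat = m.toNat / 10 := by omega
      rw [this] at hlen ⊢
      omega

lemma bV_length (m : Int) (h : 0 ≤ m) :
    (bV m).length = 9 * (Nat.digits 10 m.toNat).length + 1 :=
  bV_length_aux m.toNat m h le_rfl

lemma bAt_bV_aux (k : Nat) : ∀ m : Int, m.toNat ≤ k → ∀ s : Int, bAt (bV m) s = gN m s := by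
  induction k with
  | zero =>
    intro m hk s
    rcases lt_or_ge m 0 with hneg | h0
    · rw [bV, dif_pos hneg]
      simp [bAt, gN, hneg, PySem.List.len_eq]
    · have : m = 0 := by omega
      subst this
      rw [bV]
      simp only [lt_self_iff_false, dite_false, dite_true]
      rw [gN, if_neg (by omega), Int.toNat_zero, cnt_zero]
      rw [bAt]
      have hl : PySem.List.len ([1] : List Int) = 1 := by decide
      by_cases hs : s = 0
      · subst hs; simp [PySem.List.pyGetD]
      · rw [if_neg (by rw [hl]; omega), if_neg hs]; simp
  | succ k ih =>
    intro m hk s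
    rcases lt_or_ge m 0 with hneg | h0
    · rw [bV, dif_pos hneg]
      simp [bAt, gN, hneg, PySem.List.len_eq]
    · rcases eq_or_lt_of_le h0 with h | hpos
      · exact ih m (by omega) s
      · have hfd : PySem.Int.floordiv m 10 = m / 10 := PySem.Int.floordiv_eq_ediv_of_pos (by norm_num)
        have hmd : PySem.Int.mod m 10 = m % 10 := PySem.Int.mod_eq_emod_of_pos (by norm_num)
        have hq0 : 0 ≤ m / 10 := by omega
        have hqk : (m / 10).toNat ≤ k := by omega
        have hqk' : (m / 10 - 1).toNat ≤ k := by omega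
        have hLq := bV_length (m / 10) hq0
        have hLm := bV_length m h0
        have hdig : (Nat.digits 10 m.toNat).length = (Nat.digits 10 (m.toNat / 10)).length + 1 := by
          rw [Nat.digits_def' (by norm_num) (by omega)]; simp
        have hqt : (m / 10).toNat = m.toNat / 10 := by omega
        have hlen : (PySem.List.len (bV m)) = (9 * (Nat.digits 10 m.toNat).length + 1 : Int) := by
          simp [PySem.List.len_eq, hLm]
        by_cases hin : 0 ≤ s ∧ s < (9 * (Nat.digits 10 m.toNat).length + 1 : Int)
        · rw [bAt, if_pos (by rw [hlen]; exact hin)]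
          conv_lhs => rw [bV, dif_neg (by omega), dif_neg (by omega)]
          simp only [hfd, hmd]
          have hX : (PySem.List.len (bV (m / 10))) + 9 = (9 * (Nat.digits 10 m.toNat).length + 1 : Int) := by
            simp [PySem.List.len_eq, hLq, hqt]
            omega
          rw [hX]
          rw [PySem.List.pyGetD_map_pyRange_of_nonneg _ _ _ _ hin.1 hin.2]
          have hterm : ∀ d : Int, bAt (if d ≤ m % 10 then bV (m / 10) else bV (m / 10 - 1)) (s - d)
              = gN (if d ≤ m % 10 then m / 10 else m / 10 - 1) (s - d) := by
            intro d
            split_ifs with hd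
            · exact ih (m / 10) hqk (s - d)
            · exact ih (m / 10 - 1) hqk' (s - d)
          rw [gN, if_neg (by omega)]
          rw [cnt_decomp m.toNat s]
          have hcast : ((m.toNat : Nat) : Int) = m := by omega
          rw [hcast]
          have hrange : (PySem.List.pyRange 0 10 1) = (List.range 10).map (fun k : Nat => (k : Int)) := by decide
          rw [hrange, List.map_map]
          rw [show (∑ d ∈ Finset.range 10, gN (if (d : Int) ≤ m % 10 then m / 10 else m / 10 - 1) (s - d)) = ((List.range 10).map (fun d : Nat => gN (if (d : Int) ≤ m % 10 then m / 10 else m / 10 - 1) (s - d))).sum from (Int.neg_inj.mp rfl)]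
          congr 1
          apply List.map_congr_left
          intro d _
          simp only [Function.comp_apply]
          exact hterm (d : Int)
        · rw [bAt, if_neg (by rw [hlen]; exact hin)]
          rw [gN, if_neg (by omega)]
          rw [cnt_out m.toNat s (by omega)]
          simp

lemma bAt_bV (m : Int) (s : Int) : bAt (bV m) s = gN m s :=
  bAt_bV_aux m.toNat m le_rfl s

-- every digit sum ≥ 2 has an earlier witness of digit sum one less
lemma ds_pred (i : Nat) (h2 : 2 ≤ ds i) : ∃ j, 1 ≤ j ∧ j < i ∧ ds j = ds i - 1 := by
  induction i using Nat.strong_induction_on with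
  | _ i ih =>
    have hi2 : 2 ≤ i := by
      by_contra hc
      have := ds_small i (by omega)
      omega
    rcases Nat.eq_zero_or_pos (i % 10) with he | he
    · have hq : ds i = ds (i / 10) := by rw [ds_rec i (by omega), he]; omega
      have hq2 : 2 ≤ ds (i / 10) := by omega
      have hqlt : i / 10 < i := by omega
      obtain ⟨j, hj1, hj2, hj3⟩ := ih (i / 10) hqlt hq2
      exact ⟨j, hj1, by omega, by omega⟩
    · refine ⟨i - 1, by omega, by omega, ?_⟩
      have h1 : ds i = i % 10 + ds (i / 10) := ds_rec i (by omega)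
      have h2' : ds (i - 1) = (i - 1) % 10 + ds ((i - 1) / 10) := ds_rec (i - 1) (by omega)
      have e1 : (i - 1) % 10 = i % 10 - 1 := by omega
      have e2 : (i - 1) / 10 = i / 10 := by omega
      rw [h2', e1, e2]
      omega

lemma summList_succ (N : Nat) : summList (N + 1) = summList N ++ [(ds (N + 1) : Int)] := by
  simp [summList, List.range_succ]

lemma mem_summList (N : Nat) (s : Int) : s ∈ summList N ↔ ∃ k, k < N ∧ s = (ds (k + 1) : Int) := by
  simp [summList, eq_comm]

lemma dedup_append_singleton (l : List Int) (x : Int) :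
    PySem.List.dedup (l ++ [x]) = PySem.List.dedup l ++ (if x ∈ l then [] else [x]) := by
  rw [PySem.List.dedup_eq_ofList, PySem.List.dedup_eq_ofList,
    PySem.Set.ofList_eq_foldl, PySem.Set.ofList_eq_foldl, List.foldl_append]
  simp only [List.foldl_cons, List.foldl_nil]
  rw [PySem.Set.add]
  have hmem : (List.foldl PySem.Set.add [] l).contains x = true ↔ x ∈ l := by
    rw [← PySem.Set.ofList_eq_foldl]
    simp [PySem.Set.contains]
  split_ifs with h1 h2 h2
  · simp
  · exact absurd (hmem.mp h1) h2
  · exact absurd (hmem.mpr h2) h1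
  · simp

-- first-appearance order of digit sums of 1..N is ascending and they form an interval 1..S
lemma dedup_summList (N : Nat) (hN : 1 ≤ N) :
    ∃ S, 1 ≤ S ∧ PySem.List.dedup (summList N) = ascList S ∧
      (∀ s : Int, s ∈ summList N ↔ 1 ≤ s ∧ s ≤ (S : Int)) := by
  induction N with
  | zero => omega
  | succ N ih =>
    rcases Nat.eq_zero_or_pos N with rfl | hN1
    · refine ⟨1, le_rfl, ?_, ?_⟩
      · have h1 : summList 1 = [(1 : Int)] := by simp [summList, ds_one]
        have h2 : ascList 1 = [(1 : Int)] := by simp [ascList]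
        rw [h1, h2]
        decide
      · intro s
        have h1 : summList 1 = [(1 : Int)] := by simp [summList, ds_one]
        rw [h1]
        simp
        omega
    · obtain ⟨S, hS1, hded, hmem⟩ := ih hN1
      set x : Int := (ds (N + 1) : Int) with hxdef
      have hx1 : 1 ≤ x := by
        have := ds_pos (N + 1) (by omega)
        omega
      rw [summList_succ, dedup_append_singleton]
      by_cases hx : x ∈ summList N
      · refine ⟨S, hS1, ?_, ?_⟩
        · rw [if_pos hx, hded]; simp
        · intro s
          simp only [List.mem_append, List.mem_singleton, hmem]
          constructor
          · rintro (h | rfl)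
            · exact h
            · exact (hmem x).mp hx
          · intro h; exact Or.inl h
      · have hxS : x = (S : Int) + 1 := by
          have hge : (S : Int) + 1 ≤ x := by
            by_contra hc
            exact hx ((hmem x).mpr ⟨hx1, by omega⟩)
          have hle : x ≤ (S : Int) + 1 := by
            rcases Nat.lt_or_ge (ds (N + 1)) 2 with h2 | h2
            · omega
            · obtain ⟨j, hj1, hj2, hj3⟩ := ds_pred (N + 1) h2
              have hjmem : (ds j : Int) ∈ summList N := by
                rw [mem_summList]
                exact ⟨j - 1, by omega, by rw [show j - 1 + 1 = j from by omega]⟩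
              have := (hmem _).mp hjmem
              omega
          omega
        refine ⟨S + 1, by omega, ?_, ?_⟩
        · rw [if_neg hx, hded, show ((ds (N + 1) : Nat) : Int) = (S : Int) + 1 from hxdef ▸ hxS]
          simp [ascList, List.range_succ]
        · intro s
          simp only [List.mem_append, List.mem_singleton, hmem]
          push_cast
          constructor
          · rintro (h | rfl) <;> omega
          · intro h
            by_cases hs : s ≤ (S : Int)
            · exact Or.inl ⟨h.1, hs⟩
            · right; omega

-- B's skip-zero loop = the record loop over the nonzero values
lemma foldl_skip (l : List Int) (F : Int → Int) (p : Int × Int) :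
    l.foldl (fun p s =>
        let v := F s
        if v = 0 then p else if v ≥ p.1 then (v, p.2 + 1) else p) p
      = ((l.map F).filter (fun v => v ≠ 0)).foldl
          (fun p v => if v ≥ p.1 then (v, p.2 + 1) else p) p := by
  induction l generalizing p with
  | nil => rfl
  | cons a l ih =>
    simp only [List.foldl_cons, List.map_cons, List.filter_cons]
    by_cases h : F a = 0 <;> simp [h, ih]

-- count of a positive digit sum among 1..N = cnt
lemma count_summList (N : Nat) (s : Int) (hs : 1 ≤ s) :
    List.count s (summList N) = cnt N s := by
  rw [cnt, List.range_succ_eq_map, List.countP_cons]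
  have h0 : ¬ ((ds 0 : Int) == s) = true := by simp [ds_zero]; omega
  rw [List.count_eq_countP, summList]
  simp only [List.countP_map, h0]
  simp only [Function.comp_def, Nat.succ_eq_add_one]
  simp

-- cnt N s > 0 iff 1 ≤ s ≤ S, given the interval characterisation
lemma cnt_ne_zero_iff (N S : Nat)
    (hmem : ∀ s : Int, s ∈ summList N ↔ 1 ≤ s ∧ s ≤ (S : Int))
    (s : Int) (hs : 1 ≤ s) : cnt N s ≠ 0 ↔ s ≤ (S : Int) := by
  constructor
  · intro h
    have : 0 < (List.range (N + 1)).countP (fun x => (ds x : Int) == s) := by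
      rw [cnt] at h; omega
    obtain ⟨x, hxmem, hx⟩ := List.countP_pos_iff.mp this
    simp only [beq_iff_eq] at hx
    have hxN : x < N + 1 := List.mem_range.mp hxmem
    have hx1 : 1 ≤ x := by
      rcases Nat.eq_zero_or_pos x with rfl | h1
      · rw [ds_zero] at hx; omega
      · exact h1
    have : s ∈ summList N := by
      rw [mem_summList]
      exact ⟨x - 1, by omega, by rw [show x - 1 + 1 = x from by omega, hx]⟩
    exact ((hmem s).mp this).2
  · intro h
    obtain ⟨k, hk, hks⟩ := (mem_summList N s).mp ((hmem s).mpr ⟨hs, h⟩)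
    rw [cnt]
    have : 0 < (List.range (N + 1)).countP (fun x => (ds x : Int) == s) := by
      apply List.countP_pos_iff.mpr
      exact ⟨k + 1, List.mem_range.mpr (by omega), by simp [hks]⟩
    omega

-- ===== VERDICT (by name: the statement is the Claim_ definition above) =====
theorem MaxSumDigits_spec : Claim_equal_MaxSumDigits := by
  intro n _
  unfold Spec_MaxSumDigits
  by_cases hn : n < 1
  · have hA : MaxSumDigits n = 0 := by
      simp only [MaxSumDigits]
      rw [PySem.List.pyRange_one_eq_nil (by omega)]
      rfl
    have hB : MaxSumDigits_alt n = 0 := by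
      simp only [MaxSumDigits_alt]
      rw [if_pos hn]
    rw [hA, hB]
  · set N : Nat := n.toNat with hNdef
    have hNn : (N : Int) = n := by omega
    have hN1 : 1 ≤ N := by omega
    obtain ⟨S, hS1, hded, hmem⟩ := dedup_summList N hN1
    set L : Nat := (Nat.digits 10 N).length with hLdef
    -- A's summ list is summList N
    have hsumm : (PySem.List.pyRange 1 (n + 1) 1).foldl
        (fun acc i => acc ++ [aSumLoop i.natAbs i 0]) [] = summList N := by
      rw [PySem.List.foldl_append_singleton_eq_map, List.nil_append, PySem.List.pyRange_one]
      rw [List.map_map, show ((n + 1 : Int) - 1).toNat = N from by omega]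
      unfold summList
      apply List.map_congr_left
      intro k _
      simp only [Function.comp_apply]
      rw [show (1 + (k : Int)) = ((k + 1 : Nat) : Int) from by push_cast; ring]
      rw [show ((k + 1 : Nat) : Int).natAbs = k + 1 from by omega]
      rw [aSumLoop_eq (k + 1) (k + 1) 0 le_rfl]
      simp
    -- A = record fold over the counts in first-appearance order
    have hA : MaxSumDigits n = (((ascList S).map (fun s => (cnt N s : Int))).foldl
        (fun p v => if v ≥ p.1 then (v, p.2 + 1) else p) ((0 : Int), (0 : Int))).2 := by
      simp only [MaxSumDigits, hsumm]
      rw [show (PySem.Dict.counter (summList N)).values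
          = (PySem.Set.ofList (summList N)).map (fun k => (List.count k (summList N) : Int)) from by
        rw [PySem.Dict.values, PySem.Dict.items_counter, List.map_map]; rfl]
      rw [← PySem.List.dedup_eq_ofList, hded]
      have hmap : (ascList S).map (fun k => (List.count k (summList N) : Int))
          = (ascList S).map (fun s => (cnt N s : Int)) := by
        apply List.map_congr_left
        intro s hsm
        have hs1 : 1 ≤ s := by
          simp only [ascList, List.mem_map, List.mem_range] at hsm
          obtain ⟨j, _, rfl⟩ := hsm
          linarith [Int.natCast_nonneg j]
        rw [count_summList N s hs1]
      rw [hmap]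
    -- B = record fold over the counts for s = 1 .. S
    have hSle : (S : Int) ≤ 9 * (L : Int) := by
      obtain ⟨k, hk, hkS⟩ := (mem_summList N (S : Int)).mp
        ((hmem (S : Int)).mpr ⟨by exact_mod_cast hS1, le_rfl⟩)
      have h1 := ds_le (k + 1)
      have h2 := ds_len_mono (k + 1) N (by omega)
      rw [← hLdef] at h2
      omega
    have hlenf : PySem.List.len (bV n) = ((9 * L + 1 : Nat) : Int) := by
      have := bV_length n (by omega)
      rw [← hNn] at this ⊢
      rw [Int.toNat_natCast] at this
      simp [PySem.List.len_eq, this, ← hLdef]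
    have hB : MaxSumDigits_alt n = (((ascList S).map (fun s => (cnt N s : Int))).foldl
        (fun p v => if v ≥ p.1 then (v, p.2 + 1) else p) ((0 : Int), (0 : Int))).2 := by
      simp only [MaxSumDigits_alt, if_neg hn]
      rw [foldl_skip]
      congr 2
      -- the mapped list over the index range
      have hmapF : (PySem.List.pyRange 1 (PySem.List.len (bV n)) 1).map
          (fun s => PySem.List.pyGetD (bV n) s 0)
          = (PySem.List.pyRange 1 ((9 * L + 1 : Nat) : Int) 1).map (fun s => (cnt N s : Int)) := by
        rw [hlenf]
        apply List.map_congr_left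
        intro s hs
        have hsr := PySem.List.mem_pyRange_one.mp hs
        have hbat : bAt (bV n) s = PySem.List.pyGetD (bV n) s 0 := by
          rw [bAt, if_pos ⟨by omega, by rw [hlenf]; omega⟩]
        rw [← hbat, bAt_bV, gN, if_neg (by omega), ← hNdef]
      rw [hmapF]
      -- split the range at S + 1 and filter
      rw [PySem.List.pyRange_one_append 1 ((S : Int) + 1) _ (by omega) (by push_cast; omega)]
      rw [List.map_append, List.filter_append]
      have hkeep : ((PySem.List.pyRange 1 ((S : Int) + 1) 1).map (fun s => (cnt N s : Int))).filter
          (fun v => v ≠ 0) = (PySem.List.pyRange 1 ((S : Int) + 1) 1).map (fun s => (cnt N s : Int)) := by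
        rw [List.filter_eq_self]
        intro a ha
        obtain ⟨s, hsmem, rfl⟩ := List.mem_map.mp ha
        have hsr := PySem.List.mem_pyRange_one.mp hsmem
        have := (cnt_ne_zero_iff N S hmem s hsr.1).mpr (by omega)
        simpa using by exact_mod_cast this
      have hdrop : ((PySem.List.pyRange ((S : Int) + 1) ((9 * L + 1 : Nat) : Int) 1).map
          (fun s => (cnt N s : Int))).filter (fun v => v ≠ 0) = [] := by
        rw [List.filter_eq_nil_iff]
        intro a ha
        obtain ⟨s, hsmem, rfl⟩ := List.mem_map.mp ha
        have hsr := PySem.List.mem_pyRange_one.mp hsmem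
        have : cnt N s = 0 := by
          by_contra hc
          have := (cnt_ne_zero_iff N S hmem s (by omega)).mp hc
          omega
        simp [this]
      rw [hkeep, hdrop, List.append_nil]
      have hasc : PySem.List.pyRange 1 ((S : Int) + 1) 1 = ascList S := by
        rw [PySem.List.pyRange_one, show ((S : Int) + 1 - 1).toNat = S from by omega]
        simp only [ascList]
        exact List.map_congr_left (fun a _ => by ring)
      rw [hasc]
    rw [hA, hB]
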